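-- pv_equiv track=rewrite | github.com/harshvardhan2418/ipl_project | src/problem6.py | get_how_many_won_by_each_team_by_season
-- ===== SOURCE A (Python) =====
-- def get_how_many_won_by_each_team_by_season(data_of_the_file):
--     season_team_winners={}
--     for each_row in data_of_the_file:
--         year=each_row['season']
--         winning_team=each_row['winner']
--         if year not in season_team_winners:
--             season_team_winners[year]={}
--         if winning_team not in season_team_winners[year]:
--             season_team_winners[year][winning_team]=0
--         season_team_winners[year][winning_team]+=1
--     return season_team_winners
-- ===== SOURCE B (Python) =====
-- def get_how_many_won_by_each_team_by_season(data_of_the_file):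
--     # Phase 1: group winning teams by season (row order preserved).
--     season_to_winners = {}
--     for row in data_of_the_file:
--         season_to_winners.setdefault(row['season'], []).append(row['winner'])
--     # Phase 2: tally each season's winner list into a per-team count dict.
--     return {season: {team: winners.count(team) for team in dict.fromkeys(winners)}
--             for season, winners in season_to_winners.items()}
-- ===== Notes on version B (the rewrite author's own statement) =====
-- stated objective: alternative
-- what changed: A builds the nested season->team->count dict incrementally in one pass; B first groups winning teams into a per-season list in one pass, then tallies each season's list into counts via dict.fromkeys + list.count.
import Mathlib
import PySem

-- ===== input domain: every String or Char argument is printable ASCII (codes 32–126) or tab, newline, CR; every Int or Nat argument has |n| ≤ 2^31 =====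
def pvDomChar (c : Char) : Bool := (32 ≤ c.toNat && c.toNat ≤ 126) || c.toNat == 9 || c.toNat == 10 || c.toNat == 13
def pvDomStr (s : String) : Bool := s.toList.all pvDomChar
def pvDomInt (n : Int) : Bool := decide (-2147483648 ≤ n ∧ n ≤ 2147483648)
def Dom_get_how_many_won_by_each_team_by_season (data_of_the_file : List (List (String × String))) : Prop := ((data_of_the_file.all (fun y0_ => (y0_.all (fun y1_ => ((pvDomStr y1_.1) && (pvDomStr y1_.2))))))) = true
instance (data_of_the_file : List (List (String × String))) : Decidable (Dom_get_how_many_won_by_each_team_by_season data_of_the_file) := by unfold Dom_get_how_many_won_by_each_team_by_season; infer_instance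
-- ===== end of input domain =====

-- B replaces A's single incremental nested-dict pass by a two-phase group-then-tally
-- decomposition (group winners per season, then tally each list); objective: alternative.


-- shared row accessor: each_row[key] (first match; the KeyError case is excluded by Pre_, so getD "" is never hit there)
def pvRowGet (row : List (String × String)) (k : String) : String :=
  ((PySem.Dict.mk row).get? k).getD ""

-- ===== PORT A =====
-- A's loop body, transliterated branch for branch
def pvStepA (d : PySem.Dict String (PySem.Dict String Int)) (each_row : List (String × String)) :
    PySem.Dict String (PySem.Dict String Int) :=
  let year := pvRowGet each_row "season"
  let winning_team := pvRowGet each_row "winner"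
  let d := if d.contains year then d else d.insert year PySem.Dict.empty   -- if year not in …: … [year] = {}
  let inner := d.getD year PySem.Dict.empty                                 -- … [year]
  let inner := if inner.contains winning_team then inner else inner.insert winning_team 0
  let inner := inner.insert winning_team (inner.getD winning_team 0 + 1)    -- += 1
  d.insert year inner

def get_how_many_won_by_each_team_by_season (data_of_the_file : List (List (String × String))) : List (String × List (String × Int)) :=
  let season_team_winners := data_of_the_file.foldl pvStepA PySem.Dict.empty
  season_team_winners.items.map (fun p => (p.1, p.2.items))

-- ===== PORT B =====
def get_how_many_won_by_each_team_by_season_alt (data_of_the_file : List (List (String × String))) : List (String × List (String × Int)) :=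
  -- phase 1: season_to_winners.setdefault(row['season'], []).append(row['winner'])  ==  g[y] = g.get(y, []) + [w]
  let season_to_winners := data_of_the_file.foldl
    (fun g row => g.modify (pvRowGet row "season") [] (· ++ [pvRowGet row "winner"])) PySem.Dict.empty
  -- phase 2: {team: winners.count(team) for team in dict.fromkeys(winners)} per season
  season_to_winners.items.map
    (fun p => (p.1, (PySem.List.dedup p.2).map (fun team => (team, (p.2.count team : Int)))))

-- ===== PRECONDITION & SPEC =====
-- Pre_ excludes exactly the rows on which Python A raises KeyError: every row must carry 'season' and 'winner'.
def Pre_get_how_many_won_by_each_team_by_season (data_of_the_file : List (List (String × String))) : Prop :=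
  ∀ row ∈ data_of_the_file, "season" ∈ row.map Prod.fst ∧ "winner" ∈ row.map Prod.fst
instance (data_of_the_file : List (List (String × String))) : Decidable (Pre_get_how_many_won_by_each_team_by_season data_of_the_file) := by unfold Pre_get_how_many_won_by_each_team_by_season; infer_instance

def pvWitness_get_how_many_won_by_each_team_by_season : (List (List (String × String))) :=
  [[("season", "2017"), ("winner", "KKR")], [("season", "2017"), ("winner", "MI")], [("season", "2017"), ("winner", "KKR")]]

def Spec_get_how_many_won_by_each_team_by_season (data_of_the_file : List (List (String × String))) (out : List (String × List (String × Int))) : Prop := out = get_how_many_won_by_each_team_by_season_alt data_of_the_file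
instance (data_of_the_file : List (List (String × String))) (out : List (String × List (String × Int))) : Decidable (Spec_get_how_many_won_by_each_team_by_season data_of_the_file out) := by unfold Spec_get_how_many_won_by_each_team_by_season; infer_instance

-- ===== CLAIM (what is proved, stated in full; the proofs are below) =====
def Claim_equal_get_how_many_won_by_each_team_by_season : Prop := ∀ (data_of_the_file : List (List (String × String))), Dom_get_how_many_won_by_each_team_by_season data_of_the_file → Pre_get_how_many_won_by_each_team_by_season data_of_the_file → Spec_get_how_many_won_by_each_team_by_season data_of_the_file (get_how_many_won_by_each_team_by_season data_of_the_file)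

-- ===== LEMMAS AND PROOFS =====

-- the relation A's accumulator keeps to B's: same seasons in the same order, A's inner dict = Counter of B's winner list
def pvPhi (p : String × List String) : String × PySem.Dict String Int := (p.1, PySem.Dict.counter p.2)

-- d.modify is definitionally insert of the modified lookup (zeta of PySem.Dict.modify)
lemma pvModify_eq_insert {ν : Type} (d : PySem.Dict String ν) (k : String) (d0 : ν) (f : ν → ν) :
    d.modify k d0 f = d.insert k (f (d.getD k d0)) := by
  simp [PySem.Dict.modify]

lemma keys_eq_of_items_map (d : PySem.Dict String (PySem.Dict String Int))
    (g : PySem.Dict String (List String)) (h : d.items = g.items.map pvPhi) : d.keys = g.keys := by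
  simp only [PySem.Dict.keys, h, List.map_map]
  rfl

-- one loop step preserves the relation
lemma step_rel (r : List (String × String)) (d : PySem.Dict String (PySem.Dict String Int))
    (g : PySem.Dict String (List String)) (h : d.items = g.items.map pvPhi) (hn : g.keys.Nodup) :
    (pvStepA d r).items =
      ((g.modify (pvRowGet r "season") [] (· ++ [pvRowGet r "winner"])).items).map pvPhi := by
  set y := pvRowGet r "season" with hy
  set t := pvRowGet r "winner" with ht
  have hkeys : d.keys = g.keys := keys_eq_of_items_map d g h
  have hcont : d.contains y = g.contains y := by
    rw [PySem.Dict.contains_eq_decide_mem_keys, PySem.Dict.contains_eq_decide_mem_keys, hkeys]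
  rw [pvModify_eq_insert]
  by_cases hc : g.contains y = true
  · -- season already present
    have hdc : d.contains y = true := by rw [hcont]; exact hc
    have hsome : (PySem.Dict.get? g y).isSome = true := by
      rw [← PySem.Dict.contains_eq_isSome_get?]; exact hc
    rcases Option.isSome_iff_exists.mp hsome with ⟨ws, hws⟩
    have hmemg : (y, ws) ∈ g.items := PySem.Dict.mem_items_of_get?_eq_some g hws
    have hdn : d.keys.Nodup := by rw [hkeys]; exact hn
    have hgD : g.getD y [] = ws := PySem.Dict.getD_of_get?_eq_some g [] hws
    have hinner : d.getD y PySem.Dict.empty = PySem.Dict.counter ws := by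
      have hm : (y, PySem.Dict.counter ws) ∈ d.items := by
        rw [h]; exact List.mem_map.mpr ⟨(y, ws), hmemg, rfl⟩
      exact PySem.Dict.getD_of_mem_items _ hm hdn _
    have hinner' :
        (let inner := d.getD y PySem.Dict.empty
         let inner := if inner.contains t then inner else inner.insert t 0
         inner.insert t (inner.getD t 0 + 1)) = PySem.Dict.counter (ws ++ [t]) := by
      rw [PySem.Dict.counter_append_singleton, pvModify_eq_insert]
      simp only [hinner]
      by_cases hct : (PySem.Dict.counter ws).contains t = true
      · simp only [hct, if_true]
      · have hct' : (PySem.Dict.counter ws).contains t = false := by simpa using hct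
        simp only [hct', Bool.false_eq_true, if_false]
        rw [PySem.Dict.insert_insert_self, PySem.Dict.getD_insert_self,
            PySem.Dict.getD_of_not_contains _ 0 hct']
    simp only [pvStepA, ← hy, ← ht, hdc, if_true]
    rw [hinner', hgD]
    rw [PySem.Dict.items_insert_of_contains _ _ hdc, PySem.Dict.items_insert_of_contains _ _ hc, h,
        List.map_map, List.map_map]
    apply List.map_congr_left
    intro p hp
    by_cases hpy : (p.1 == y) = true
    · have hpy' : p.1 = y := by simpa using hpy
      have hp2 : p.2 = ws := by
        have h1 := PySem.Dict.get?_of_mem_items g hp hn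
        rw [hpy', hws] at h1; exact (Option.some_inj.mp h1).symm
      simp [pvPhi, hpy', hp2]
    · have hpy2 : p.1 ≠ y := by simpa using hpy
      simp [pvPhi, hpy2]
  · -- fresh season
    have hc' : g.contains y = false := by simpa using hc
    have hdc' : d.contains y = false := by rw [hcont]; exact hc'
    have hstep : pvStepA d r = d.insert y (PySem.Dict.counter [t]) := by
      simp only [pvStepA, ← hy, ← ht, hdc', Bool.false_eq_true, if_false]
      rw [PySem.Dict.getD_insert_self]
      have hce : (PySem.Dict.empty : PySem.Dict String Int).contains t = false :=
        PySem.Dict.contains_empty t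
      simp only [hce, Bool.false_eq_true, if_false]
      rw [PySem.Dict.insert_insert_self, PySem.Dict.getD_insert_self, PySem.Dict.insert_insert_self]
      rfl
    rw [hstep, PySem.Dict.items_insert_of_not_contains _ _ hdc',
        PySem.Dict.items_insert_of_not_contains _ _ hc',
        PySem.Dict.getD_of_not_contains g [] hc', h]
    simp [pvPhi]

-- the whole fold preserves the relation
lemma fold_rel (l : List (List (String × String))) :
    ∀ (d : PySem.Dict String (PySem.Dict String Int)) (g : PySem.Dict String (List String)),
      d.items = g.items.map pvPhi → g.keys.Nodup →
      (l.foldl pvStepA d).items =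
        ((l.foldl (fun g row => g.modify (pvRowGet row "season") [] (· ++ [pvRowGet row "winner"])) g).items).map pvPhi := by
  induction l with
  | nil => intro d g h _; simpa using h
  | cons r rest ih =>
      intro d g h hn
      simp only [List.foldl_cons]
      exact ih _ _ (step_rel r d g h hn)
        (by
          have hnd := PySem.Dict.nodup_keys_foldl_modify_key (l := [r])
            (key := fun row => pvRowGet row "season") (d0 := ([] : List String))
            (f := fun _ row ws => ws ++ [pvRowGet row "winner"]) (d := g) hn
          simpa using hnd)

-- ===== VERDICT (by name: the statement is the Claim_ definition above) =====
theorem get_how_many_won_by_each_team_by_season_spec : Claim_equal_get_how_many_won_by_each_team_by_season := by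
  intro data _ _
  show (List.map (fun p => (p.1, p.2.items)) (data.foldl pvStepA PySem.Dict.empty).items) =
    List.map (fun p => (p.1, List.map (fun team => (team, ((p.2.count team : Nat) : Int))) (PySem.List.dedup p.2)))
      (data.foldl (fun g row => g.modify (pvRowGet row "season") [] (· ++ [pvRowGet row "winner"])) PySem.Dict.empty).items
  rw [fold_rel data PySem.Dict.empty PySem.Dict.empty rfl PySem.Dict.nodup_keys_empty, List.map_map]
  apply List.map_congr_left
  intro p _
  simp [pvPhi, PySem.Dict.items_counter, PySem.List.dedup_eq_ofList]
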